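-- pv_equiv track=rewrite | github.com/pypi-data/pypi-mirror-395 | packages/tinysync/tinysync-0.0.21-py3-none-any.whl/tinysync/backendMethods.py | util_filter_paths
-- ===== SOURCE A (Python) =====
-- def util_filter_paths(paths):
--     '''
--     GPT: 要解决这个问题，即从给定的路径列表中找出一个最小的子集，使得列表中的其他所有路径都是这个子集中某个路径的子路径，
--     可以使用以下算法。此算法的目标是确保选择的路径列表尽可能短，同时包含其它所有路径。
--     '''
--     # 步骤1: 排序路径
--     sorted_paths = sorted(paths)
--
--     # 步骤2: 筛选路径
--     result = []
--     for path in sorted_paths: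
--         if not result:
--             result.append(path)
--         else:
--             # 检查当前路径是否为结果中最后一个路径的子路径
--             if not path.startswith(result[-1] + '/'):
--                 result.append(path)
--
--     return result
-- ===== SOURCE B (Python) =====
-- def util_filter_paths(paths):
--     # Sort once; then, instead of comparing every element against result[-1],
--     # jump over each contiguous block of descendants with a binary search:
--     # the descendants of head are exactly the strings in [head+'/', head+'0'),
--     # since '0' is the character right after '/'.
--     s = sorted(paths)
--     n = len(s)
--     out = []
--     i = 0
--     while i < n:
--         head = s[i]
--         out.append(head)
--         i += 1
--         if i < n and s[i].startswith(head + '/'):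
--             target = head + '0'  # chr(ord('/') + 1) == '0'
--             lo, hi = i + 1, n
--             while lo < hi:
--                 mid = (lo + hi) // 2
--                 if s[mid] < target:
--                     lo = mid + 1
--                 else:
--                     hi = mid
--             i = lo
--     return out
-- ===== Notes on version B (the rewrite author's own statement) =====
-- stated objective: alternative
-- what changed: Replaces A's element-by-element pass that compares each sorted path against result[-1] with index jumps: after keeping a path, a binary search locates the end of the contiguous block of its descendants (exactly the sorted strings in [head+'/', head+'0')) and skips the whole block at once.
import Mathlib
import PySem

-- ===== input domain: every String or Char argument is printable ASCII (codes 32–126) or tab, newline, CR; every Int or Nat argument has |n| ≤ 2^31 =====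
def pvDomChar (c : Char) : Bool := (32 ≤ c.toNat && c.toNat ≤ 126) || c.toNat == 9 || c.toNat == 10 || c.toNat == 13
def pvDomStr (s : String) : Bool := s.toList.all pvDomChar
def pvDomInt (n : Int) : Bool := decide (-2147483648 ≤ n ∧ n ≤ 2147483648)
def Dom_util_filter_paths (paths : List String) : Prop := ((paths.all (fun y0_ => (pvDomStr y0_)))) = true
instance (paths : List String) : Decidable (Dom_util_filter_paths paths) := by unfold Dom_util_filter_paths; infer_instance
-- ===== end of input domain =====

-- B replaces A's per-element comparison against result[-1] by binary-search jumps over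
-- each contiguous descendant block of the sorted list; same result, same cost class.

-- ===== PORT A =====
def util_filter_paths (paths : List String) : List String :=
  let sorted_paths := PySem.List.sorted paths (fun x => x) false
  sorted_paths.foldl
    (fun result path =>
      if result.isEmpty then
        result ++ [path]
      else
        if !(PySem.Str.startswith path (result.getLast! ++ "/")) then
          result ++ [path]
        else
          result)
    []

-- ===== PORT B =====
-- the inner `while lo < hi` binary search of Source B (fuel = hi - lo bounds its iterations;
-- s[mid] is in range whenever lo < hi ≤ len s, so `getD` is exact there)
def pvBsGo (s : List String) (target : String) : Nat → Nat → Nat → Nat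
  | 0, lo, _hi => lo
  | fuel + 1, lo, hi =>
    if lo < hi then
      let mid := (lo + hi) / 2
      if s.getD mid "" < target then pvBsGo s target fuel (mid + 1) hi
      else pvBsGo s target fuel lo mid
    else lo

-- the outer `while i < n` loop of Source B (fuel = n - i bounds its iterations; i only grows)
def pvLoopGo (s : List String) (n : Nat) : Nat → Nat → List String
  | 0, _ => []
  | fuel + 1, i =>
    if i < n then
      let head := s.getD i ""
      if i + 1 < n ∧ PySem.Str.startswith (s.getD (i + 1) "") (head ++ "/") = true then
        head :: pvLoopGo s n fuel (pvBsGo s (head ++ "0") (n - (i + 2)) (i + 2) n)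
      else
        head :: pvLoopGo s n fuel (i + 1)
    else []

def util_filter_paths_alt (paths : List String) : List String :=
  let s := PySem.List.sorted paths (fun x => x) false
  pvLoopGo s s.length s.length 0

-- ===== PRECONDITION & SPEC =====
def Spec_util_filter_paths (paths : List String) (out : List String) : Prop := out = util_filter_paths_alt paths
instance (paths : List String) (out : List String) : Decidable (Spec_util_filter_paths paths out) := by unfold Spec_util_filter_paths; infer_instance

-- ===== CLAIM (what is proved, stated in full; the proofs are below) =====
def Claim_equal_util_filter_paths : Prop := ∀ (paths : List String), Dom_util_filter_paths paths → Spec_util_filter_paths paths (util_filter_paths paths)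

-- ===== LEMMAS AND PROOFS =====

/-- The last-kept-element recursion both ports compute. -/
def pvGo (last : Option String) : List String → List String
  | [] => []
  | p :: t =>
    match last with
    | none => p :: pvGo (some p) t
    | some l =>
      if PySem.Str.startswith p (l ++ "/") then pvGo (some l) t
      else p :: pvGo (some p) t

/-- A's fold from any accumulator is the accumulator followed by `pvGo` of its last element. -/
theorem pvFoldl_eq_go (S : List String) : ∀ acc : List String,
    S.foldl
      (fun result path =>
        if result.isEmpty then result ++ [path]
        else
          if !(PySem.Str.startswith path (result.getLast! ++ "/")) then result ++ [path]
          else result)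
      acc
    = acc ++ pvGo acc.getLast? S := by
  induction S with
  | nil => intro acc; simp [pvGo]
  | cons p t ih =>
    intro acc
    rcases acc with _ | ⟨a, as⟩
    · exact ih [p]
    · have hlast? : (a :: as).getLast? = some ((a :: as).getLast!) := by
        simp [List.getLast!, List.getLast?_eq_some_getLast]
      rw [hlast?]
      rcases hsw : PySem.Str.startswith p ((a :: as).getLast! ++ "/") with _ | _
      · simp only [List.foldl_cons, List.isEmpty_cons, Bool.false_eq_true, if_false, hsw,
          Bool.not_false, if_true, pvGo]
        rw [ih (a :: as ++ [p]), show ((a :: as) ++ [p]).getLast? = some p from List.getLast?_concat]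
        simp
      · simp only [List.foldl_cons, List.isEmpty_cons, Bool.false_eq_true, if_false, hsw,
          Bool.not_true, if_false, pvGo, if_true]
        rw [ih (a :: as), hlast?]

-- ---- lexicographic facts about the descendant interval [h ++ "/", h ++ "0") ----

theorem pvList_not_append_lt (h : List Char) : ∀ r, ¬ (h ++ r) < h := by
  induction h with
  | nil => intro r hc; cases hc
  | cons a h' ih =>
    intro r hc
    cases hc with
    | rel h1 => exact lt_irrefl a h1
    | cons h1 => exact ih r h1

theorem pvList_append_lt_append (h : List Char) {a b : Char} (hab : a < b) :
    ∀ r r', h ++ a :: r < h ++ b :: r' := by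
  induction h with
  | nil => intro r r'; exact List.Lex.rel hab
  | cons x h' ih => intro r r'; exact List.Lex.cons (ih r r')

theorem pvInterval_prefix : ∀ (h x : List Char),
    ¬ x < h ++ ['/'] → x < h ++ ['0'] → (h ++ ['/']) <+: x := by
  intro h
  induction h with
  | nil =>
    intro x h1 h2
    cases x with
    | nil => exact absurd List.Lex.nil h1
    | cons c r =>
      have hc0 : c < '0' := by
        cases h2 with
        | rel h' => exact h'
        | cons h' => cases h'
      have hcs : ¬ c < '/' := fun hlt => h1 (List.Lex.rel hlt)
      have hc : c = '/' := by
        have h3 : c.val.toNat < 48 := UInt32.lt_iff_toNat_lt.mp hc0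
        have h4 : ¬ c.val.toNat < 47 := fun hv => hcs (UInt32.lt_iff_toNat_lt.mpr hv)
        have h5 : c.val.toNat = 47 := by omega
        exact Char.ext (UInt32.toNat_inj.mp (by simpa using h5))
      exact hc ▸ ⟨r, rfl⟩
  | cons a h' ih =>
    intro x h1 h2
    cases x with
    | nil => exact absurd List.Lex.nil h1
    | cons d r =>
      have hda : ¬ d < a := fun hlt => h1 (List.Lex.rel hlt)
      have hd : d = a := by
        cases h2 with
        | rel h' => exact absurd h' hda
        | cons h' => rfl
      subst hd
      have h1' : ¬ r < h' ++ ['/'] := fun hlt => h1 (List.Lex.cons hlt)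
      have h2' : r < h' ++ ['0'] := by
        cases h2 with
        | rel h' => exact absurd h' (lt_irrefl _)
        | cons h' => exact h'
      obtain ⟨t, ht⟩ := ih r h1' h2'
      exact ⟨t, by simp [← ht]⟩

theorem pvStartswith_le {h x : String} (hsw : PySem.Str.startswith x (h ++ "/") = true) :
    h ++ "/" ≤ x := by
  rw [PySem.Str.startswith_eq, PySem.Chars.startswith_iff] at hsw
  obtain ⟨r, hr⟩ := hsw
  rw [String.le_iff_toList_le]
  have hx : x.toList = (h ++ "/").toList ++ r := hr.symm
  rw [hx]
  exact le_of_not_gt (pvList_not_append_lt _ r)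

theorem pvStartswith_lt_target {h x : String} (hsw : PySem.Str.startswith x (h ++ "/") = true) :
    x < h ++ "0" := by
  rw [PySem.Str.startswith_eq, PySem.Chars.startswith_iff] at hsw
  obtain ⟨r, hr⟩ := hsw
  rw [String.lt_iff_toList_lt]
  have hx : x.toList = h.toList ++ '/' :: r := by simpa using hr.symm
  have ht : (h ++ "0").toList = h.toList ++ '0' :: [] := by simp
  rw [hx, ht]
  exact pvList_append_lt_append h.toList (by decide) r []

theorem pvInterval_startswith {h x : String} (h1 : h ++ "/" ≤ x) (h2 : x < h ++ "0") :
    PySem.Str.startswith x (h ++ "/") = true := by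
  rw [PySem.Str.startswith_eq, PySem.Chars.startswith_iff]
  have h1' : ¬ x.toList < (h ++ "/").toList := by
    rw [String.le_iff_toList_le] at h1
    exact not_lt.mpr h1
  have h2' : x.toList < (h ++ "0").toList := String.lt_iff_toList_lt.mp h2
  have hp := pvInterval_prefix h.toList x.toList
    (by simpa using h1') (by simpa using h2')
  simpa using hp

-- ---- the binary search finds the first index ≥ lo at which s[_] < target fails ----

theorem pvBsGo_spec (s : List String) (target : String)
    (hdc : ∀ j k, j ≤ k → k < s.length → s.getD j "" ≤ s.getD k "") :
    ∀ fuel lo hi, hi ≤ s.length → lo ≤ hi → hi - lo ≤ fuel →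
      lo ≤ pvBsGo s target fuel lo hi ∧ pvBsGo s target fuel lo hi ≤ hi ∧
      (∀ j, lo ≤ j → j < pvBsGo s target fuel lo hi → s.getD j "" < target) ∧
      (pvBsGo s target fuel lo hi < hi → ¬ s.getD (pvBsGo s target fuel lo hi) "" < target) := by
  intro fuel
  induction fuel with
  | zero =>
    intro lo hi hhi hlh hf
    have : lo = hi := by omega
    subst this
    simp [pvBsGo]
    omega
  | succ fuel ih =>
    intro lo hi hhi hlh hf
    by_cases hlt : lo < hi
    · have hmid1 : lo ≤ (lo + hi) / 2 := by omega
      have hmid2 : (lo + hi) / 2 < hi := by omega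
      simp only [pvBsGo, if_pos hlt]
      by_cases hc : s.getD ((lo + hi) / 2) "" < target
      · rw [if_pos hc]
        obtain ⟨r1, r2, r3, r4⟩ := ih ((lo + hi) / 2 + 1) hi hhi (by omega) (by omega)
        refine ⟨by omega, r2, ?_, r4⟩
        intro j hj1 hj2
        by_cases hjm : j ≤ (lo + hi) / 2
        · exact lt_of_le_of_lt (hdc j ((lo + hi) / 2) hjm (by omega)) hc
        · exact r3 j (by omega) hj2
      · rw [if_neg hc]
        obtain ⟨r1, r2, r3, r4⟩ := ih lo ((lo + hi) / 2) (by omega) (by omega) (by omega)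
        refine ⟨r1, by omega, r3, ?_⟩
        intro _ 
        by_cases hrm : pvBsGo s target fuel lo ((lo + hi) / 2) < (lo + hi) / 2
        · exact r4 hrm
        · have : pvBsGo s target fuel lo ((lo + hi) / 2) = (lo + hi) / 2 := by omega
          rw [this]; exact hc
    · simp only [pvBsGo, if_neg hlt]
      exact ⟨le_rfl, by omega, fun j h1 h2 => absurd h2 (by omega), fun h => absurd h hlt⟩

-- ---- pvGo housekeeping ----

theorem pvGo_skip (head : String) : ∀ (run rest : List String),
    (∀ x ∈ run, PySem.Str.startswith x (head ++ "/") = true) →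
    pvGo (some head) (run ++ rest) = pvGo (some head) rest := by
  intro run
  induction run with
  | nil => intro rest _; rfl
  | cons x run' ih =>
    intro rest hall
    have hx := hall x (by simp)
    simp only [List.cons_append, pvGo, hx, if_true]
    exact ih rest fun y hy => hall y (List.mem_cons_of_mem _ hy)

theorem pvGo_some_eq_none (l : String) : ∀ (xs : List String),
    (∀ p t, xs = p :: t → PySem.Str.startswith p (l ++ "/") = false) →
    pvGo (some l) xs = pvGo none xs := by
  intro xs hx
  cases xs with
  | nil => rfl
  | cons p t =>
    have h := hx p t rfl
    simp only [pvGo, h, Bool.false_eq_true, if_false]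

-- ---- the outer loop computes pvGo over the tail of the sorted list ----

theorem pvLoopGo_eq_go (s : List String) (hsort : s.Pairwise (· ≤ ·)) :
    ∀ fuel i, s.length - i ≤ fuel → pvLoopGo s s.length fuel i = pvGo none (s.drop i) := by
  have hdc : ∀ j k, j ≤ k → k < s.length → s.getD j "" ≤ s.getD k "" := by
    intro j k hjk hk
    rcases eq_or_lt_of_le hjk with rfl | hlt
    · exact le_rfl
    · rw [List.getD_eq_getElem s "" (by omega), List.getD_eq_getElem s "" hk]
      exact List.pairwise_iff_getElem.mp hsort j k (by omega) hk hlt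
  intro fuel
  induction fuel with
  | zero =>
    intro i hf
    rw [List.drop_eq_nil_of_le (by omega)]
    rfl
  | succ fuel ih =>
    intro i hf
    by_cases hin : i < s.length
    · have hdropi : s.drop i = s[i] :: s.drop (i + 1) := List.drop_eq_getElem_cons hin
      have hgi : s.getD i "" = s[i] := List.getD_eq_getElem s "" hin
      rw [hdropi]
      show (if i < s.length then _ else _) = _
      rw [if_pos hin]
      by_cases hcond : i + 1 < s.length ∧
          PySem.Str.startswith (s.getD (i + 1) "") (s.getD i "" ++ "/") = true
      · rw [if_pos hcond]
        obtain ⟨hi1, hsw1⟩ := hcond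
        obtain ⟨r1, r2, r3, r4⟩ := pvBsGo_spec s (s.getD i "" ++ "0") hdc
          (s.length - (i + 2)) (i + 2) s.length le_rfl (by omega) le_rfl
        set r := pvBsGo s (s.getD i "" ++ "0") (s.length - (i + 2)) (i + 2) s.length with hr
        -- every element in positions [i+1, r) is a descendant of s[i]
        have hrun : ∀ j, i + 1 ≤ j → j < r →
            PySem.Str.startswith (s.getD j "") (s.getD i "" ++ "/") = true := by
          intro j hj1 hj2
          rcases eq_or_lt_of_le hj1 with rfl | hj1'
          · exact hsw1
          · refine pvInterval_startswith ?_ (r3 j (by omega) hj2)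
            exact le_trans (pvStartswith_le hsw1) (hdc (i + 1) j (by omega) (by omega))
        -- split drop (i+1) into the run and drop r
        have hsplit : s.drop (i + 1)
            = (s.drop (i + 1)).take (r - (i + 1)) ++ s.drop r := by
          rw [show s.drop r = (s.drop (i+1)).drop (r - (i+1)) by
              rw [List.drop_drop]; congr 1; omega]
          exact (List.take_append_drop _ _).symm
        have hallrun : ∀ x ∈ (s.drop (i + 1)).take (r - (i + 1)),
            PySem.Str.startswith x (s.getD i "" ++ "/") = true := by
          intro x hx
          obtain ⟨j, hj, hjx⟩ := List.mem_iff_getElem.mp hx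
          have hjlen : j < s.length - (i + 1) := by
            have := hj
            simp only [List.length_take, List.length_drop] at this
            omega
          have hjr : j < r - (i + 1) := by
            have := hj
            simp only [List.length_take] at this
            omega
          have hx' : x = s[i + 1 + j] := by
            rw [← hjx, List.getElem_take, List.getElem_drop]
          rw [hx', ← List.getD_eq_getElem s "" (by omega)]
          exact hrun (i + 1 + j) (by omega) (by omega)
        -- A's pass skips exactly this run, landing at position r
        have hgo : pvGo (some s[i]) (s.drop (i + 1)) = pvGo none (s.drop r) := by
          rw [hsplit, ← hgi, pvGo_skip _ _ _ hallrun]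
          apply pvGo_some_eq_none
          intro p t hpt
          have hrn : r < s.length := by
            by_contra hge
            rw [List.drop_eq_nil_of_le (by omega)] at hpt
            exact (List.cons_ne_nil p t) hpt.symm
          have hp : p = s[r] := by
            rw [List.drop_eq_getElem_cons hrn] at hpt
            exact ((List.cons.injEq .. ▸ hpt).1).symm
          rcases hps : PySem.Str.startswith p (s.getD i "" ++ "/") with _ | _
          · rfl
          · exfalso
            apply r4 hrn
            rw [List.getD_eq_getElem s "" hrn, ← hp]
            exact pvStartswith_lt_target hps
        rw [ih r (by omega), pvGo, ← hgo, hgi]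
      · rw [if_neg hcond]
        rw [ih (i + 1) (by omega), pvGo, hgi]
        congr 1
        apply (pvGo_some_eq_none _ _ _).symm
        intro p t hpt
        have hi1 : i + 1 < s.length := by
          by_contra hge
          rw [List.drop_eq_nil_of_le (by omega)] at hpt
          exact (List.cons_ne_nil p t) hpt.symm
        have hp : p = s[i + 1] := by
          rw [List.drop_eq_getElem_cons hi1] at hpt
          exact ((List.cons.injEq .. ▸ hpt).1).symm
        rcases hps : PySem.Str.startswith p (s[i] ++ "/") with _ | _
        · rfl
        · exfalso
          apply hcond
          refine ⟨hi1, ?_⟩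
          rw [List.getD_eq_getElem s "" hi1, hgi, ← hp]
          exact hps
    · rw [List.drop_eq_nil_of_le (by omega)]
      show (if i < s.length then _ else _) = _
      rw [if_neg hin]
      rfl

-- ===== VERDICT (by name: the statement is the Claim_ definition above) =====
theorem util_filter_paths_spec : Claim_equal_util_filter_paths := by
  intro paths _
  have h1 : util_filter_paths paths = pvGo none (PySem.List.sorted paths (fun x => x) false) :=
    pvFoldl_eq_go (PySem.List.sorted paths (fun x => x) false) []
  have h2 : util_filter_paths_alt paths
      = pvGo none (PySem.List.sorted paths (fun x => x) false) := by
    have := pvLoopGo_eq_go (PySem.List.sorted paths (fun x => x) false)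
      (PySem.List.sorted_pairwise ..) (PySem.List.sorted paths (fun x => x) false).length 0
      (by omega)
    simpa [util_filter_paths_alt] using this
  show util_filter_paths paths = util_filter_paths_alt paths
  rw [h1, h2]
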